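-- pv_equiv track=rewrite | github.com/vabruzzo/tool-attn | main.py | _find_char_to_token_span
-- ===== SOURCE A (Python) =====
-- def _find_char_to_token_span(
--     token_strs: list[str],
--     char_start: int,
--     char_end: int,
-- ) -> tuple[int, int] | None:
--     """Map character range to token indices."""
--     char_idx = 0
--     start_token = None
--     end_token = None
--
--     for i, tok_str in enumerate(token_strs):
--         tok_start = char_idx
--         tok_end = char_idx + len(tok_str)
--
--         if tok_start <= char_start < tok_end and start_token is None:
--             start_token = i
--         if tok_start < char_end <= tok_end:
--             end_token = i + 1
--             break
--
--         char_idx = tok_end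
--
--     if start_token is not None and end_token is not None:
--         return (start_token, end_token)
--     return None
-- ===== SOURCE B (Python) =====
-- def _find_char_to_token_span(token_strs, char_start, char_end):
--     # cumulative-offset table: offsets[i] = char start of token i, offsets[i+1] = its end
--     offsets = [0]
--     for t in token_strs:
--         offsets.append(offsets[-1] + len(t))
--     intervals = list(zip(offsets, offsets[1:]))
--     end_j = None
--     for j, (lo, hi) in enumerate(intervals):
--         if lo < char_end <= hi:
--             end_j = j
--             break
--     if end_j is None:
--         return None
--     for i, (lo, hi) in enumerate(intervals[:end_j + 1]):
--         if lo <= char_start < hi: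
--             return (i, end_j + 1)
--     return None
-- ===== Notes on version B (the rewrite author's own statement) =====
-- stated objective: alternative
-- what changed: Replaces A's single stateful scan (running char_idx with start/end accumulators and a break) by building a cumulative-offset interval table once and then doing two table-driven first-match lookups (end interval first, then start interval within the first end_j+1 intervals).
import Mathlib
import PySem

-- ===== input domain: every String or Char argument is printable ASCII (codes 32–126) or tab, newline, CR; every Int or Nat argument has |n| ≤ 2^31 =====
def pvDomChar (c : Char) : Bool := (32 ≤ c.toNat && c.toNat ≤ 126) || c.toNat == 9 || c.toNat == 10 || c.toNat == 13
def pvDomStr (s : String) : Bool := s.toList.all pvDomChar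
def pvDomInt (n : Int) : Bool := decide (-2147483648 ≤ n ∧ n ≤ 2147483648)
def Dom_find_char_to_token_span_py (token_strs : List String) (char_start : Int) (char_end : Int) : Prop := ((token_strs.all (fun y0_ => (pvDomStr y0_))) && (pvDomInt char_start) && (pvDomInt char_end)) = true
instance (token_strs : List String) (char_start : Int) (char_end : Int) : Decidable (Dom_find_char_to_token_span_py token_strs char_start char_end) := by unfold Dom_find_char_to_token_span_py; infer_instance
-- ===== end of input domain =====

-- B replaces A's single stateful scan (running char_idx, start/end accumulators, break)
-- by a prefix-offset table plus two table-driven first-match lookups; same O(n) cost (objective: alternative).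

-- ===== PORT A =====
-- the for-loop of A: state = (enumerate index i, char_idx, start_token); break returns early
def pvLoopA (cs ce : Int) : List String → Int → Int → Option Int → Option Int × Option Int
  | [], _, _, s? => (s?, none)
  | t :: rest, i, charIdx, s? =>
    let tokStart := charIdx
    let tokEnd := charIdx + PySem.Str.len t
    let s?' := if tokStart ≤ cs ∧ cs < tokEnd ∧ s? = none then some i else s?
    if tokStart < ce ∧ ce ≤ tokEnd then (s?', some (i + 1))
    else pvLoopA cs ce rest (i + 1) tokEnd s?'

def find_char_to_token_span_py (token_strs : List String) (char_start : Int) (char_end : Int) : Option (Int × Int) :=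
  match pvLoopA char_start char_end token_strs 0 0 none with
  | (some s, some e) => some (s, e)
  | _ => none

-- ===== PORT B =====
-- offsets = [0]; for t in token_strs: offsets.append(offsets[-1] + len(t))
def pvOffsets : List String → Int → List Int
  | [], acc => [acc]
  | t :: rest, acc => acc :: pvOffsets rest (acc + PySem.Str.len t)

def find_char_to_token_span_py_alt (token_strs : List String) (char_start : Int) (char_end : Int) : Option (Int × Int) :=
  let offsets := pvOffsets token_strs 0
  let intervals := offsets.zip offsets.tail
  match intervals.findIdx? (fun p => decide (p.1 < char_end) && decide (char_end ≤ p.2)) with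
  | none => none
  | some j =>
    match (intervals.take (j + 1)).findIdx? (fun p => decide (p.1 ≤ char_start) && decide (char_start < p.2)) with
    | none => none
    | some i => some ((i : Int), (j : Int) + 1)

-- ===== PRECONDITION & SPEC =====
def Spec_find_char_to_token_span_py (token_strs : List String) (char_start : Int) (char_end : Int) (out : Option (Int × Int)) : Prop := out = find_char_to_token_span_py_alt token_strs char_start char_end
instance (token_strs : List String) (char_start : Int) (char_end : Int) (out : Option (Int × Int)) : Decidable (Spec_find_char_to_token_span_py token_strs char_start char_end out) := by unfold Spec_find_char_to_token_span_py; infer_instance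

-- ===== CLAIM (what is proved, stated in full; the proofs are below) =====
def Claim_equal_find_char_to_token_span_py : Prop := ∀ (token_strs : List String) (char_start : Int) (char_end : Int), Dom_find_char_to_token_span_py token_strs char_start char_end → Spec_find_char_to_token_span_py token_strs char_start char_end (find_char_to_token_span_py token_strs char_start char_end)

-- ===== LEMMAS AND PROOFS =====

theorem pvIntervals_cons (t : List String) (u : String) (c : Int) :
    (pvOffsets (u :: t) c).zip (pvOffsets (u :: t) c).tail
      = (c, c + PySem.Str.len u) ::
        ((pvOffsets t (c + PySem.Str.len u)).zip (pvOffsets t (c + PySem.Str.len u)).tail) := by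
  cases t <;> simp [pvOffsets]

theorem pvLoopA_eq (cs ce : Int) :
    ∀ (toks : List String) (i c : Int) (s? : Option Int),
    (match pvLoopA cs ce toks i c s? with
     | (some s, some e) => some (s, e)
     | _ => none)
    = (match ((pvOffsets toks c).zip (pvOffsets toks c).tail).findIdx? (fun p => decide (p.1 < ce) && decide (ce ≤ p.2)) with
       | none => none
       | some j =>
         match s? with
         | some s => some (s, i + (j : Int) + 1)
         | none =>
           match (((pvOffsets toks c).zip (pvOffsets toks c).tail).take (j + 1)).findIdx? (fun p => decide (p.1 ≤ cs) && decide (cs < p.2)) with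
           | none => none
           | some k => some (i + (k : Int), i + (j : Int) + 1)) := by
  intro toks
  induction toks with
  | nil =>
    intro i c s?
    cases s? <;> simp [pvLoopA, pvOffsets]
  | cons t rest ih =>
    intro i c s?
    rw [pvIntervals_cons]
    simp only [pvLoopA]
    generalize PySem.Str.len t = L
    by_cases hE : c < ce ∧ ce ≤ c + L
    · have hEb : (fun (p : Int × Int) => decide (p.1 < ce) && decide (ce ≤ p.2)) (c, c + L) = true := by
        simp [hE.1, hE.2]
      rw [if_pos hE, List.findIdx?_cons, if_pos hEb]
      cases s? with
      | some s =>
        have : ¬ (c ≤ cs ∧ cs < c + L ∧ (some s : Option Int) = none) := by simp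
        rw [if_neg this]; simp
      | none =>
        by_cases hS : c ≤ cs ∧ cs < c + L
        · have hSb : (decide ((c, c + L).1 ≤ cs) && decide (cs < (c, c + L).2)) = true := by
            simp [hS.1, hS.2]
          rw [if_pos ⟨hS.1, hS.2, rfl⟩]
          simp [List.take_succ_cons, List.findIdx?_cons, hSb]
        · have hSb : (decide ((c, c + L).1 ≤ cs) && decide (cs < (c, c + L).2)) = false := by
            simpa [Decidable.not_and_iff_not_or_not] using (fun h1 h2 => hS ⟨h1, h2⟩)
          have hcond : ¬ (c ≤ cs ∧ cs < c + L ∧ (none : Option Int) = none) := by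
            rintro ⟨h1, h2, -⟩; exact hS ⟨h1, h2⟩
          rw [if_neg hcond]
          simp only [List.take_succ_cons, List.findIdx?_cons, hSb, Bool.false_eq_true, if_false,
            List.take_zero, List.findIdx?_nil, Option.map_none]
    · -- no break on this token
      have hEb : (decide ((c, c + L).1 < ce) && decide (ce ≤ (c, c + L).2)) = false := by
        simpa [Decidable.not_and_iff_not_or_not] using (fun h1 h2 => hE ⟨h1, h2⟩)
      rw [if_neg hE, List.findIdx?_cons, hEb, ih (i + 1) (c + L)]
      simp only [Bool.false_eq_true, if_false]
      cases hfe : ((pvOffsets rest (c + L)).zip (pvOffsets rest (c + L)).tail).findIdx?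
          (fun p => decide (p.1 < ce) && decide (ce ≤ p.2)) with
      | none => rfl
      | some j =>
        simp only [Option.map_some]
        cases s? with
        | some s =>
          by_cases hS0 : c ≤ cs ∧ cs < c + L ∧ (some s : Option Int) = none
          · exact absurd hS0.2.2 (by simp)
          · rw [if_neg hS0]
            simp only [Option.some.injEq, Prod.mk.injEq, true_and]
            push_cast; ring
        | none =>
          by_cases hS : c ≤ cs ∧ cs < c + L
          · have hSb : (decide ((c, c + L).1 ≤ cs) && decide (cs < (c, c + L).2)) = true := by
              simp [hS.1, hS.2]
            rw [if_pos ⟨hS.1, hS.2, rfl⟩]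
            simp only [List.take_succ_cons, List.findIdx?_cons, if_pos hSb]
            simp only [Option.some.injEq, Prod.mk.injEq]
            constructor
            · push_cast; ring
            · push_cast; ring
          · have hSb : (decide ((c, c + L).1 ≤ cs) && decide (cs < (c, c + L).2)) = false := by
              simpa [Decidable.not_and_iff_not_or_not] using (fun h1 h2 => hS ⟨h1, h2⟩)
            have hcond : ¬ (c ≤ cs ∧ cs < c + L ∧ (none : Option Int) = none) := by
              rintro ⟨h1, h2, -⟩; exact hS ⟨h1, h2⟩
            rw [if_neg hcond]
            simp only [List.take_succ_cons, List.findIdx?_cons, hSb, Bool.false_eq_true, if_false]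
            cases hfs : (((pvOffsets rest (c + L)).zip (pvOffsets rest (c + L)).tail).take (j + 1)).findIdx?
                (fun p => decide (p.1 ≤ cs) && decide (cs < p.2)) with
            | none => rfl
            | some k =>
              simp only [Option.map_some, Option.some.injEq, Prod.mk.injEq]
              constructor
              · push_cast; ring
              · push_cast; ring

-- ===== VERDICT (by name: the statement is the Claim_ definition above) =====
theorem find_char_to_token_span_py_spec : Claim_equal_find_char_to_token_span_py := by
  intro toks cs ce _
  unfold Spec_find_char_to_token_span_py find_char_to_token_span_py find_char_to_token_span_py_alt
  rw [pvLoopA_eq]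
  simp only []
  cases hfe : ((pvOffsets toks 0).zip (pvOffsets toks 0).tail).findIdx?
      (fun p => decide (p.1 < ce) && decide (ce ≤ p.2)) with
  | none => simp
  | some j =>
    simp only []
    cases hfs : (((pvOffsets toks 0).zip (pvOffsets toks 0).tail).take (j + 1)).findIdx?
        (fun p => decide (p.1 ≤ cs) && decide (cs < p.2)) with
    | none => simp
    | some k => simp
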